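-- pv_equiv track=rewrite | github.com/C27joseph/ManaGen_DiscordBot | library.py | handleArgs
-- ===== SOURCE A (Python) =====
-- def handleArgs(content):
--     args = []
--     message = ""
--     found_message = False
--     for word in content.split():
--         if word.startswith("#"):
--             found_message = True
--         if found_message:
--             message += word+" "
--         else:
--             args.append(word)
--     return args, message.rstrip()
-- ===== SOURCE B (Python) =====
-- def handleArgs(content):
--     words = content.split()
--     i = next((k for k, w in enumerate(words) if w.startswith("#")), len(words))
--     return words[:i], " ".join(words[i:])
-- ===== Notes on version B (the rewrite author's own statement) =====
-- stated objective: simpler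
-- what changed: Replaces A's flag-carrying accumulation loop (found_message flag, per-word string concatenation plus a final rstrip) by computing the split index of the first '#'-word once, then slicing words[:i] / ' '.join(words[i:]).
import Mathlib
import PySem

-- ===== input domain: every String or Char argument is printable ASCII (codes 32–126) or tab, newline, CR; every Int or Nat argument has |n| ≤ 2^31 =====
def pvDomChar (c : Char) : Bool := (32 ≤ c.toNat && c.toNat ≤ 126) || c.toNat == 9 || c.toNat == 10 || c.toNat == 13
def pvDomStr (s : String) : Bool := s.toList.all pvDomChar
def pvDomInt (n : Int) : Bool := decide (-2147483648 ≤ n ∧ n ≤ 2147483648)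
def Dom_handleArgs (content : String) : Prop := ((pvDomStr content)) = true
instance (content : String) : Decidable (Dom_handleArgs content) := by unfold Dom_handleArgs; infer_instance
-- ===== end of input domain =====

-- B replaces A's found_message flag loop (per-word concatenation + final rstrip) by computing the first '#'-word index once, then slicing and joining; same behaviour, simpler.

-- ===== PORT A =====
-- A's loop body: update the flag, then either extend the message (word + " ") or append the word to args.
def haStep (st : List String × List Char × Bool) (word : String) : List String × List Char × Bool :=
  let found := if PySem.Str.startswith word "#" then true else st.2.2
  if found then (st.1, st.2.1 ++ word.toList ++ [' '], found)
  else (st.1 ++ [word], st.2.1, found)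

def handleArgs (content : String) : List String × String :=
  let r := (PySem.Str.split₀ content).foldl haStep ([], [], false)
  (r.1, String.ofList (PySem.Chars.rstrip r.2.1))

-- ===== PORT B =====
def handleArgs_alt (content : String) : List String × String :=
  let words := PySem.Str.split₀ content
  let i := words.findIdx (fun w => PySem.Str.startswith w "#")
  (words.take i, PySem.Str.join " " (words.drop i))

-- ===== PRECONDITION & SPEC =====
def Spec_handleArgs (content : String) (out : List String × String) : Prop := out = handleArgs_alt content
instance (content : String) (out : List String × String) : Decidable (Spec_handleArgs content out) := by unfold Spec_handleArgs; infer_instance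

-- ===== CLAIM (what is proved, stated in full; the proofs are below) =====
def Claim_equal_handleArgs : Prop := ∀ (content : String), Dom_handleArgs content → Spec_handleArgs content (handleArgs content)

-- ===== LEMMAS AND PROOFS =====

-- every word produced by split() is nonempty and whitespace-free
theorem split₀_go_words (s cur : List Char) (acc : List (List Char))
    (hcur : ∀ c ∈ cur, PySem.Chars.isspace c = false)
    (hacc : ∀ w ∈ acc, w ≠ [] ∧ ∀ c ∈ w, PySem.Chars.isspace c = false) :
    ∀ w ∈ PySem.Chars.split₀.go s cur acc, w ≠ [] ∧ ∀ c ∈ w, PySem.Chars.isspace c = false := by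
  induction s generalizing cur acc with
  | nil =>
      intro w hw
      unfold PySem.Chars.split₀.go at hw
      split at hw
      · exact hacc w (List.mem_reverse.mp hw)
      · rename_i hne
        rcases List.mem_cons.mp (List.mem_reverse.mp hw) with h | h
        · subst h
          refine ⟨by simpa [List.isEmpty_iff] using hne, ?_⟩
          intro c hc; exact hcur c (List.mem_reverse.mp hc)
        · exact hacc w h
  | cons c rest ih =>
      intro w hw
      unfold PySem.Chars.split₀.go at hw
      split at hw
      · split at hw
        · exact ih [] acc (by simp) hacc w hw
        · rename_i hne
          refine ih [] (cur.reverse :: acc) (by simp) ?_ w hw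
          intro v hv
          rcases List.mem_cons.mp hv with h | h
          · subst h
            refine ⟨by simpa [List.isEmpty_iff] using hne, ?_⟩
            intro d hd; exact hcur d (List.mem_reverse.mp hd)
          · exact hacc v h
      · rename_i hns
        refine ih (c :: cur) acc ?_ hacc w hw
        intro d hd
        rcases List.mem_cons.mp hd with h | h
        · subst h; simpa using hns
        · exact hcur d h

theorem split₀_words (s : List Char) :
    ∀ w ∈ PySem.Chars.split₀ s, w ≠ [] ∧ ∀ c ∈ w, PySem.Chars.isspace c = false := by
  unfold PySem.Chars.split₀
  exact split₀_go_words s [] [] (by simp) (by simp)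

theorem rstrip_append (a b : List Char) (h : b.any (fun c => !PySem.Chars.isspace c) = true) :
    PySem.Chars.rstrip (a ++ b) = a ++ PySem.Chars.rstrip b := by
  unfold PySem.Chars.rstrip
  rw [List.reverse_append, List.dropWhile_append]
  rw [if_neg (by
    intro hemp
    have hnil : List.dropWhile PySem.Chars.isspace b.reverse = [] := by
      simpa [List.isEmpty_iff] using hemp
    rcases List.any_eq_true.mp h with ⟨c, hc, hns⟩
    have hct := List.dropWhile_eq_nil_iff.mp hnil c (List.mem_reverse.mpr hc)
    simp [hct] at hns)]
  simp

-- rstrip of the word-plus-trailing-space concatenation is exactly ' '.join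
theorem rstrip_flatten_eq_join (ws : List (List Char))
    (h : ∀ w ∈ ws, w ≠ [] ∧ ∀ c ∈ w, PySem.Chars.isspace c = false) :
    PySem.Chars.rstrip ((ws.map (fun w => w ++ [' '])).flatten) = PySem.Chars.join [' '] ws := by
  induction ws with
  | nil => simp [PySem.Chars.rstrip, PySem.Chars.join, List.intercalate]
  | cons w rest ih =>
      obtain ⟨hw, hns⟩ := h w (by simp)
      cases rest with
      | nil =>
          simp only [List.map_cons, List.map_nil, List.flatten_cons, List.flatten_nil,
            List.append_nil]
          unfold PySem.Chars.rstrip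
          rw [List.reverse_append]
          simp only [List.reverse_cons, List.reverse_nil, List.nil_append, List.singleton_append]
          rw [List.dropWhile_cons_of_pos (by simp [PySem.Chars.isspace])]
          have hself : List.dropWhile PySem.Chars.isspace w.reverse = w.reverse := by
            cases hrev : w.reverse with
            | nil => simp
            | cons d t =>
                have hd : d ∈ w := by
                  have : d ∈ w.reverse := by rw [hrev]; simp
                  simpa using this
                rw [List.dropWhile_cons_of_neg (by simp [hns d hd])]
          rw [hself]
          simp [PySem.Chars.join, List.intercalate]
      | cons r rs =>
          obtain ⟨hr, hrns⟩ := h r (by simp)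
          have hrest : ∀ v ∈ r :: rs, v ≠ [] ∧ ∀ c ∈ v, PySem.Chars.isspace c = false := by
            intro v hv; exact h v (by simp [hv])
          simp only [List.map_cons, List.flatten_cons] at ih ⊢
          rw [show w ++ [' '] ++ (r ++ [' '] ++ ((rs.map (fun w => w ++ [' '])).flatten)) =
              (w ++ [' ']) ++ (r ++ [' '] ++ ((rs.map (fun w => w ++ [' '])).flatten)) by simp]
          rw [rstrip_append]
          · rw [ih hrest]
            simp [PySem.Chars.join, List.intercalate]
          · cases hr' : r with
            | nil => exact absurd hr' hr
            | cons c t =>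
                have hcr : c ∈ r := by simp [hr']
                refine List.any_eq_true.mpr ⟨c, by simp, ?_⟩
                simp [hrns c hcr]

theorem foldl_found_true (ws : List String) (args : List String) (msg : List Char) :
    ws.foldl haStep (args, msg, true) =
      (args, msg ++ (ws.map (fun w => w.toList ++ [' '])).flatten, true) := by
  induction ws generalizing msg with
  | nil => simp
  | cons w rest ih =>
      simp only [List.foldl_cons, haStep]
      rw [if_pos (by split <;> rfl)]
      split
      · simp [ih]
      · simp [ih]

theorem foldl_found_false (ws : List String) (args : List String) :
    ws.foldl haStep (args, [], false) =
      (args ++ ws.take (ws.findIdx (fun w => PySem.Str.startswith w "#")),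
       ((ws.drop (ws.findIdx (fun w => PySem.Str.startswith w "#"))).map
         (fun w => w.toList ++ [' '])).flatten,
       ws.any (fun w => PySem.Str.startswith w "#")) := by
  induction ws generalizing args with
  | nil => simp
  | cons w rest ih =>
      by_cases hp : PySem.Str.startswith w "#" = true
      · have hpc : PySem.Chars.startswith w.toList ['#'] = true := by simpa using hp
        simp only [List.foldl_cons, haStep, hp, if_true]
        rw [foldl_found_true]
        simp [List.findIdx_cons, hpc, List.any_cons]
      · have hpf : PySem.Str.startswith w "#" = false := Bool.eq_false_iff.mpr hp
        have hpcf : PySem.Chars.startswith w.toList ['#'] = false := by simpa using hpf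
        simp only [List.foldl_cons, haStep, hpf, Bool.false_eq_true, if_false]
        rw [ih]
        simp [List.findIdx_cons, hpcf, List.any_cons]

-- ===== VERDICT (by name: the statement is the Claim_ definition above) =====
theorem handleArgs_spec : Claim_equal_handleArgs := by
  intro content _
  unfold Spec_handleArgs handleArgs handleArgs_alt
  rw [foldl_found_false]
  simp only [List.nil_append, Prod.mk.injEq]
  refine ⟨by trivial, ?_⟩
  have hwords : ∀ w ∈ PySem.Str.split₀ content,
      w.toList ≠ [] ∧ ∀ c ∈ w.toList, PySem.Chars.isspace c = false := by
    intro w hw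
    rcases List.mem_map.mp (by simpa [PySem.Str.split₀] using hw) with ⟨cs, hcs, rfl⟩
    simpa [String.toList_ofList] using split₀_words content.toList cs hcs
  have hmm : ((PySem.Str.split₀ content).drop
        ((PySem.Str.split₀ content).findIdx (fun w => PySem.Str.startswith w "#"))).map
        (fun w => w.toList ++ [' ']) =
      (((PySem.Str.split₀ content).drop
        ((PySem.Str.split₀ content).findIdx (fun w => PySem.Str.startswith w "#"))).map
        String.toList).map (fun l => l ++ [' ']) := by
    rw [List.map_map]; rfl
  rw [hmm, rstrip_flatten_eq_join _ (by
    intro v hv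
    rcases List.mem_map.mp hv with ⟨u, hu, rfl⟩
    exact hwords u (List.mem_of_mem_drop hu))]
  simp only [PySem.Str.join]
  rw [show (" " : String).toList = [' '] by rfl]
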